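-- pv_equiv track=rewrite | github.com/erikkjellgren/SlowQuant | slowquant/qiskit_interface/util.py | get_reordering_sign
-- ===== SOURCE A (Python) =====
-- def get_reordering_sign(det: str) -> int:
--     """Get sign from reordering determinant.
--
--     The reordering is done from spin-paired to spin-blocked.
--
--     Args:
--         det: Determinant.
--
--     Returns:
--         Phase factor from the reordering.
--     """
--     sign = 1
--     alphas = 0
--     for i, occ in enumerate(det[::-1]):
--         # Doing reverse thus alpha are the uneven
--         if i % 2 == 1 and occ == "1":
--             alphas += 1
--         # Doing the reverse thus beta are the even
--         elif i % 2 == 0 and occ == "1":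
--             if alphas % 2 == 1:
--                 sign *= -1
--     return sign
-- ===== SOURCE B (Python) =====
-- def get_reordering_sign(det: str) -> int:
--     """Two-pass variant: build a prefix table of occupied-alpha counts over the
--     reversed string, then sum alpha parities over occupied betas."""
--     rev = det[::-1]
--     # pass 1: pref[i] = number of occupied alphas (odd reversed index, '1') before position i
--     pref = [0]
--     a = 0
--     for i, ch in enumerate(rev):
--         if i % 2 == 1 and ch == "1":
--             a += 1
--         pref.append(a)
--     # pass 2: each occupied beta (even reversed index, '1') contributes its alpha-prefix parity
--     flips = sum(p % 2 for (i, ch), p in zip(enumerate(rev), pref) if i % 2 == 0 and ch == "1")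
--     return -1 if flips % 2 == 1 else 1
-- ===== Notes on version B (the rewrite author's own statement) =====
-- stated objective: alternative
-- what changed: Replaces A's single conditional sign-flipping accumulator loop with a two-pass scheme: a first sweep builds a prefix table of cumulative occupied-alpha counts over the reversed string, and a second pass sums the alpha-prefix parity over occupied beta positions, returning -1 iff that total is odd.
import Mathlib
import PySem

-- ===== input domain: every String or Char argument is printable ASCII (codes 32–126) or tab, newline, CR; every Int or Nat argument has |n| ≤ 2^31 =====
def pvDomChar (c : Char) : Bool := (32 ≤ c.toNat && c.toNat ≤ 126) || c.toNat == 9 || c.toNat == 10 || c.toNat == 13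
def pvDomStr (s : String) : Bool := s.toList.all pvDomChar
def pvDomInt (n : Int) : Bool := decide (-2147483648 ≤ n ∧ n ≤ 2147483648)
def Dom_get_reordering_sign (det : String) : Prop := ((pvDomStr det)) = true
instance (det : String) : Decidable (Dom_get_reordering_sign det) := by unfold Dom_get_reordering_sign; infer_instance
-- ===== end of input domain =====

-- B replaces A's single conditional sign-flipping loop with a prefix-table pass plus a
-- parity-summation pass over occupied betas (alternative decomposition, same O(n) cost).

-- ===== PORT A =====
-- loop body of A: state (sign, alphas), item (reversed index, char)
def stepA (st : Int × Int) (p : Int × Char) : Int × Int :=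
  if p.1 % 2 == 1 && p.2 == '1' then (st.1, st.2 + 1)
  else if p.1 % 2 == 0 && p.2 == '1' then
    (if st.2 % 2 == 1 then (st.1 * (-1), st.2) else st)
  else st

def get_reordering_sign (det : String) : Int :=
  ((PySem.List.enumerate (det.toList.reverse)).foldl stepA (1, 0)).1

-- ===== PORT B =====
-- pass-1 step: cumulative count of occupied alphas (odd reversed index, char '1')
def altStep (a : Int) (p : Int × Char) : Int :=
  if p.1 % 2 == 1 && p.2 == '1' then a + 1 else a

-- pass-2 step: an occupied beta (even reversed index, '1') contributes its alpha-prefix parity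
def altStep2 (s : Int) (q : (Int × Char) × Int) : Int :=
  if q.1.1 % 2 == 0 && q.1.2 == '1' then s + q.2 % 2 else s

def get_reordering_sign_alt (det : String) : Int :=
  let rev := det.toList.reverse
  let e := PySem.List.enumerate rev
  let pref := e.scanl altStep 0          -- pass 1: prefix table (Source B's append loop = scanl)
  let flips := (e.zip pref).foldl altStep2 0   -- pass 2: sum parities over occupied betas
  if flips % 2 == 1 then -1 else 1

-- ===== PRECONDITION & SPEC =====
def Spec_get_reordering_sign (det : String) (out : Int) : Prop := out = get_reordering_sign_alt det
instance (det : String) (out : Int) : Decidable (Spec_get_reordering_sign det out) := by unfold Spec_get_reordering_sign; infer_instance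

-- ===== CLAIM (what is proved, stated in full; the proofs are below) =====
def Claim_equal_get_reordering_sign : Prop := ∀ (det : String), Dom_get_reordering_sign det → Spec_get_reordering_sign det (get_reordering_sign det)

-- ===== LEMMAS AND PROOFS =====

-- number of sign flips A performs on an enumerated tail, starting from alpha count a
def flipsRec : List (Int × Char) → Int → Int
  | [], _ => 0
  | p :: e, a =>
    if p.1 % 2 == 1 && p.2 == '1' then flipsRec e (a + 1)
    else if p.1 % 2 == 0 && p.2 == '1' then a % 2 + flipsRec e a
    else flipsRec e a

def pm (k : Int) : Int := if k % 2 == 1 then -1 else 1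

theorem pm_add (x y : Int) : pm (x + y) = pm x * pm y := by
  unfold pm
  have hx : x % 2 = 0 ∨ x % 2 = 1 := Int.emod_two_eq x
  have hy : y % 2 = 0 ∨ y % 2 = 1 := Int.emod_two_eq y
  have h : (x + y) % 2 = (x % 2 + y % 2) % 2 := by omega
  rcases hx with hx | hx <;> rcases hy with hy | hy <;> simp [h, hx, hy]

theorem foldA_fst (e : List (Int × Char)) : ∀ (s a : Int),
    (e.foldl stepA (s, a)).1 = s * pm (flipsRec e a) := by
  induction e with
  | nil => intro s a; simp [flipsRec, pm]
  | cons p e ih =>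
    intro s a
    rw [List.foldl_cons]
    by_cases h1 : (p.1 % 2 == 1 && p.2 == '1') = true
    · rw [show stepA (s, a) p = (s, a + 1) from by simp [stepA, h1], ih,
        show flipsRec (p :: e) a = flipsRec e (a + 1) from by simp [flipsRec, h1]]
    · by_cases h2 : (p.1 % 2 == 0 && p.2 == '1') = true
      · have hfr : flipsRec (p :: e) a = a % 2 + flipsRec e a := by
          simp [flipsRec, h1, h2]
        by_cases h3 : (a % 2 == 1) = true
        · have ha : a % 2 = 1 := by simpa using h3
          rw [show stepA (s, a) p = (s * (-1), a) from by simp [stepA, h1, h2, h3],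
            ih, hfr, pm_add, show pm (a % 2) = -1 from by simp [pm, ha]]
          ring
        · have ha : a % 2 = 0 := by
            have := Int.emod_two_eq a
            simp at h3; omega
          rw [show stepA (s, a) p = (s, a) from by simp [stepA, h1, h2, h3],
            ih, hfr, pm_add, show pm (a % 2) = 1 from by simp [pm, ha]]
          ring
      · rw [show stepA (s, a) p = (s, a) from by simp [stepA, h1, h2], ih,
          show flipsRec (p :: e) a = flipsRec e a from by simp [flipsRec, h1, h2]]

theorem foldB_eq (e : List (Int × Char)) : ∀ (a t : Int),
    ((e.zip (e.scanl altStep a)).foldl altStep2 t) = t + flipsRec e a := by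
  induction e with
  | nil => intro a t; simp [flipsRec]
  | cons p e ih =>
    intro a t
    rw [List.scanl_cons, List.zip_cons_cons, List.foldl_cons]
    by_cases h1 : (p.1 % 2 == 1 && p.2 == '1') = true
    · have ha : p.1 % 2 = 1 := by
        have := (Bool.and_eq_true _ _).mp h1
        simpa using this.1
      have h2 : ¬(p.1 % 2 == 0 && p.2 == '1') = true := by simp [ha]
      rw [show altStep2 t (p, a) = t from by simp [altStep2, h2],
        show altStep a p = a + 1 from by simp [altStep, h1], ih,
        show flipsRec (p :: e) a = flipsRec e (a + 1) from by simp [flipsRec, h1]]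
    · rw [show altStep a p = a from by simp [altStep, h1]]
      by_cases h2 : (p.1 % 2 == 0 && p.2 == '1') = true
      · rw [show altStep2 t (p, a) = t + a % 2 from by simp [altStep2, h2], ih,
          show flipsRec (p :: e) a = a % 2 + flipsRec e a from by simp [flipsRec, h1, h2]]
        ring
      · rw [show altStep2 t (p, a) = t from by simp [altStep2, h2], ih,
          show flipsRec (p :: e) a = flipsRec e a from by simp [flipsRec, h1, h2]]

-- ===== VERDICT (by name: the statement is the Claim_ definition above) =====
theorem get_reordering_sign_spec : Claim_equal_get_reordering_sign := by
  intro det _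
  unfold Spec_get_reordering_sign get_reordering_sign get_reordering_sign_alt
  rw [foldA_fst]
  simp only [foldB_eq, zero_add, pm, one_mul]
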